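-- pv_equiv track=rewrite | github.com/loopstack/looptune | loop_tool_service/models/datasets/gen.py | gen_split
-- ===== SOURCE A (Python) =====
-- def gen_split(n):
--   def f(splits):
--     return list(filter(lambda x: 1 not in x, splits))
--   splits = []
--   if n <= 2:
--     return f(splits)
--   for i in range(2, min(n, 6)):
--     splits.append((i,))
--   if n <= 6:
--     return f(splits)
--   for i in range(6, min(n, 16), 2):
--     splits.append((i,))
--   if n <= 16:
--     return f(splits)
--   for i in range(16, min(n, 64), 4):
--     splits.append((i,))
--   return f(splits)
-- ===== SOURCE B (Python) =====
-- def gen_split(n):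
--   # closed form: count of produced tuples, then the k-th value by an index formula
--   if n <= 2:
--     m = 0
--   elif n <= 6:
--     m = n - 2
--   elif n <= 16:
--     m = 4 + (n - 5) // 2
--   elif n <= 64:
--     m = 9 + (n - 13) // 4
--   else:
--     m = 21
--   return [(k + 2,) if k < 4 else (2 * k - 2,) if k < 9 else (4 * k - 20,) for k in range(m)]
-- ===== Notes on version B (the rewrite author's own statement) =====
-- stated objective: alternative
-- what changed: Replaces the staged range loops and the no-op filter with a closed-form count m(n) plus a direct index-to-value formula, building the result as a comprehension over range(m).
import Mathlib
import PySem

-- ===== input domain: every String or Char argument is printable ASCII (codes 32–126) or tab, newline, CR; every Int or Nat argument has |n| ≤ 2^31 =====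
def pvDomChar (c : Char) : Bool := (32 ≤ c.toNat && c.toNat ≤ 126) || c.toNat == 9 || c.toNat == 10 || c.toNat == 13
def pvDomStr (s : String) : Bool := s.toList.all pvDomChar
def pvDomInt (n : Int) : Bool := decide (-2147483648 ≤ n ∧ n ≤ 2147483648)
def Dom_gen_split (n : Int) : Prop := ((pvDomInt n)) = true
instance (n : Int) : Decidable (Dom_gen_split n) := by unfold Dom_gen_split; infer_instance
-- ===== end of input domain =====

-- ===== PORT A =====
-- B computes a closed-form count and an index-to-value formula instead of staged range loops.
def gen_split (n : Int) : List (List Int) :=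
  let f : List (List Int) → List (List Int) :=
    fun splits => splits.filter (fun x => decide ((1:Int) ∉ x))
  let splits : List (List Int) := []
  if n ≤ 2 then f splits
  else
    let splits := splits ++ (PySem.List.pyRange 2 (min n 6) 1).map (fun i => [i])
    if n ≤ 6 then f splits
    else
      let splits := splits ++ (PySem.List.pyRange 6 (min n 16) 2).map (fun i => [i])
      if n ≤ 16 then f splits
      else f (splits ++ (PySem.List.pyRange 16 (min n 64) 4).map (fun i => [i]))

-- ===== PORT B =====
def gen_split_alt (n : Int) : List (List Int) :=
  let m : Int :=
    if n ≤ 2 then 0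
    else if n ≤ 6 then n - 2
    else if n ≤ 16 then 4 + PySem.Int.floordiv (n - 5) 2
    else if n ≤ 64 then 9 + PySem.Int.floordiv (n - 13) 4
    else 21
  (PySem.List.pyRange 0 m 1).map
    (fun k => if k < 4 then [k + 2] else if k < 9 then [2 * k - 2] else [4 * k - 20])

-- ===== PRECONDITION & SPEC =====
def Spec_gen_split (n : Int) (out : List (List Int)) : Prop := out = gen_split_alt n
instance (n : Int) (out : List (List Int)) : Decidable (Spec_gen_split n out) := by unfold Spec_gen_split; infer_instance

-- ===== CLAIM (what is proved, stated in full; the proofs are below) =====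
def Claim_equal_gen_split : Prop := ∀ (n : Int), Dom_gen_split n → Spec_gen_split n (gen_split n)

-- ===== LEMMAS AND PROOFS =====

-- ===== VERDICT (by name: the statement is the Claim_ definition above) =====
-- both programs depend on n only through its clamp to [2, 64]
theorem gen_split_clamp (n : Int) : gen_split n = gen_split (max 2 (min n 64)) := by
  by_cases h2 : n ≤ 2
  · have : max 2 (min n 64) = 2 := by omega
    rw [this]; simp [gen_split, h2]
  · by_cases h64 : n ≤ 64
    · have : max 2 (min n 64) = n := by omega
      rw [this]
    · have hc : max 2 (min n 64) = 64 := by omega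
      have e6 : min n 6 = min (64:Int) 6 := by omega
      have e16 : min n 16 = min (64:Int) 16 := by omega
      have e64 : min n 64 = min (64:Int) 64 := by omega
      simp only [gen_split, e6, e16, e64]
      have : ¬ n ≤ 2 := h2
      simp only [this, if_false]
      have : ¬ n ≤ 6 := by omega
      simp only [this, if_false]
      have : ¬ n ≤ 16 := by omega
      simp only [this, if_false]
      norm_num

theorem gen_split_alt_clamp (n : Int) : gen_split_alt n = gen_split_alt (max 2 (min n 64)) := by
  by_cases h2 : n ≤ 2
  · have : max 2 (min n 64) = 2 := by omega
    rw [this]; simp [gen_split_alt, h2]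
  · by_cases h64 : n ≤ 64
    · have : max 2 (min n 64) = n := by omega
      rw [this]
    · have hc : max 2 (min n 64) = 64 := by omega
      rw [hc]
      simp only [gen_split_alt]
      have e2 : ¬ n ≤ 2 := h2
      have e6 : ¬ n ≤ 6 := by omega
      have e16 : ¬ n ≤ 16 := by omega
      have e64 : ¬ n ≤ 64 := h64
      simp only [e2, e6, e16, e64, if_false]
      norm_num [PySem.Int.floordiv]
      congr 1

theorem gen_split_key (c : Int) (h1 : 2 ≤ c) (h2 : c ≤ 64) :
    gen_split c = gen_split_alt c := by
  interval_cases c <;> decide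

theorem gen_split_spec : Claim_equal_gen_split := by
  intro n _
  unfold Spec_gen_split
  rw [gen_split_clamp, gen_split_alt_clamp]
  exact gen_split_key _ (by omega) (by omega)
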